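-- pv_equiv track=rewrite | github.com/salman5876/BnR-Django-main | scrapy/walmartdata.py | get_last_sku
-- ===== SOURCE A (Python) =====
-- def get_last_sku(data):
--     temp = data[::-1]
--
--     for i in temp:
--         try:
--             return "WM"+i["productId"]
--         except:
--             pass
--
--
--     raise Exception("")
-- ===== SOURCE B (Python) =====
-- def get_last_sku(data):
--     result = None
--     found = False
--     for i in data:
--         try:
--             result = "WM" + i["productId"]
--             found = True
--         except:
--             pass
--     if found:
--         return result
--     raise Exception("")
-- ===== Notes on version B (the rewrite author's own statement) =====
-- stated objective: alternative
-- what changed: B replaces A's reverse-then-early-return scan with a single forward pass keeping the last valid SKU in an accumulator.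
import Mathlib
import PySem

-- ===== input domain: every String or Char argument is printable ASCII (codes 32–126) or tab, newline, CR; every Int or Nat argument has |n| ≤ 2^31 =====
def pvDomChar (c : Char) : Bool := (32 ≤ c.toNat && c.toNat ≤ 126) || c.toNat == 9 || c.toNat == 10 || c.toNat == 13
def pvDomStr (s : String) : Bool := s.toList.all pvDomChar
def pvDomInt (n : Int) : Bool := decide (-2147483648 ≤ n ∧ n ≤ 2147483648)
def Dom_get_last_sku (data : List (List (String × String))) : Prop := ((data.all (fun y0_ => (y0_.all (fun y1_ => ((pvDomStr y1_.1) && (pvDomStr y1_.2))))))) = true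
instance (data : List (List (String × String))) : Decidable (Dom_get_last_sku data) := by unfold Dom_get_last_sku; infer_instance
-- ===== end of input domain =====

-- B: forward single pass keeping the last valid SKU in an accumulator, instead of
-- A's reverse-then-early-return scan; same result, alternative decomposition.
-- Pre_ excludes inputs where no item has a "productId" key: there A (and B) raise Exception("").


-- ===== PORT A =====
-- dict indexing i["productId"] on the assoc list: first matching key (exact for Python dicts)
def pvLookup (i : List (String × String)) : Option String := i.lookup "productId"

-- the for-loop over temp with early return; the Exception("") case is outside Pre_ ("" placeholder)
def pvLoopA : List (List (String × String)) → String
  | [] => ""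
  | i :: rest =>
    match pvLookup i with
    | some v => "WM" ++ v
    | none => pvLoopA rest

def get_last_sku (data : List (List (String × String))) : String :=
  -- temp = data[::-1]  (PySem.List.slice?_none_none_neg_one: this is reverse)
  pvLoopA data.reverse

-- ===== PORT B =====
def get_last_sku_alt (data : List (List (String × String))) : String :=
  -- result=None; for i in data: try overwrite; return result if found (raise outside Pre_)
  let result := data.foldl
    (fun acc i =>
      match pvLookup i with
      | some v => some ("WM" ++ v)
      | none => acc) (none : Option String)
  match result with
  | some s => s
  | none => ""

-- ===== PRECONDITION & SPEC =====
-- Pre_ excludes exactly the inputs where no item carries a "productId" key: there A raises Exception("") (B raises too).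
def Pre_get_last_sku (data : List (List (String × String))) : Prop :=
  ∃ i ∈ data, ∃ p ∈ i, p.1 = "productId"
instance (data : List (List (String × String))) : Decidable (Pre_get_last_sku data) := by
  unfold Pre_get_last_sku; infer_instance
def pvWitness_get_last_sku : (List (List (String × String))) := [[("productId", "123")]]
def Spec_get_last_sku (data : List (List (String × String))) (out : String) : Prop := out = get_last_sku_alt data
instance (data : List (List (String × String))) (out : String) : Decidable (Spec_get_last_sku data out) := by unfold Spec_get_last_sku; infer_instance

-- ===== CLAIM (what is proved, stated in full; the proofs are below) =====
def Claim_equal_get_last_sku : Prop := ∀ (data : List (List (String × String))), Dom_get_last_sku data → Pre_get_last_sku data → Spec_get_last_sku data (get_last_sku data)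

-- ===== LEMMAS AND PROOFS =====

-- B's forward overwrite fold equals "first hit of the reversed list", as an option.
theorem pvFold_eq_rev (data : List (List (String × String))) (acc : Option String) :
    data.foldl
      (fun acc i =>
        match pvLookup i with
        | some v => some ("WM" ++ v)
        | none => acc) acc
    = (data.reverse.findSome? (fun i => (pvLookup i).map ("WM" ++ ·))).or acc := by
  induction data generalizing acc with
  | nil => simp
  | cons i rest ih =>
    simp only [List.foldl_cons, List.reverse_cons, List.findSome?_append, ih]
    cases h : rest.reverse.findSome? (fun i => (pvLookup i).map ("WM" ++ ·)) with
    | some v => simp [Option.or]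
    | none =>
      cases hl : pvLookup i <;> simp [Option.or, List.findSome?, hl]

-- the key "productId" occurring in i makes the dict lookup succeed
theorem pvLookup_isSome (i : List (String × String)) (p : String × String)
    (hp : p ∈ i) (hk : p.1 = "productId") : (pvLookup i).isSome := by
  induction i with
  | nil => cases hp
  | cons q rest ih =>
    unfold pvLookup List.lookup
    rw [List.mem_cons] at hp
    rcases hp with h | h
    · subst h; simp [hk]
    · split
      · simp
      · exact ih h

-- A's loop equals first hit of its list, defaulting to "".
theorem pvLoopA_eq (l : List (List (String × String))) :
    pvLoopA l = ((l.findSome? (fun i => (pvLookup i).map ("WM" ++ ·))).getD "") := by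
  induction l with
  | nil => simp [pvLoopA]
  | cons i rest ih =>
    cases hl : pvLookup i <;> simp [pvLoopA, List.findSome?, hl, ih]

theorem pvPre_findSome (data : List (List (String × String)))
    (h : Pre_get_last_sku data) :
    (data.reverse.findSome? (fun i => (pvLookup i).map ("WM" ++ ·))).isSome := by
  obtain ⟨i, hi, p, hp, hk⟩ := h
  rw [List.findSome?_isSome_iff]
  refine ⟨i, by simpa using hi, ?_⟩
  have : (pvLookup i).isSome := pvLookup_isSome i p hp hk
  simp [Option.isSome_map, this]

-- ===== VERDICT (by name: the statement is the Claim_ definition above) =====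
theorem get_last_sku_spec : Claim_equal_get_last_sku := by
  intro data _ hpre
  unfold Spec_get_last_sku get_last_sku get_last_sku_alt
  simp only [pvFold_eq_rev, pvLoopA_eq]
  cases h : data.reverse.findSome? (fun i => (pvLookup i).map ("WM" ++ ·)) with
  | some v => simp [Option.or]
  | none =>
    have := pvPre_findSome data hpre
    rw [h] at this; simp at this
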